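-- pv_equiv track=rewrite | github.com/beutkarshh/IGNISIA_THE_COMPILERS | agents/tools.py | check_medication_interactions
-- ===== SOURCE A (Python) =====
-- from typing import Dict, List, Any, Optional, Callable
--
-- def check_medication_interactions(medications: List[str]) -> List[Dict[str, str]]:
--     """
--     Check for potential medication interactions.
--     (Simplified - would use real drug database in production)
--     """
--     # Placeholder - would integrate with drug interaction API
--     known_interactions = {
--         ('warfarin', 'aspirin'): 'Increased bleeding risk',
--         ('nsaid', 'ace_inhibitor'): 'Reduced antihypertensive effect'
--     }
--
--     interactions = []
--     for i, med1 in enumerate(medications):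
--         for med2 in medications[i+1:]:
--             if (med1, med2) in known_interactions:
--                 interactions.append({
--                     'drug1': med1,
--                     'drug2': med2,
--                     'interaction': known_interactions[(med1, med2)]
--                 })
--
--     return interactions
-- ===== SOURCE B (Python) =====
-- from typing import List, Dict
--
-- def check_medication_interactions(medications: List[str]) -> List[Dict[str, str]]:
--     # Index positions of the interaction partners once, then emit matches
--     # per triggering drug: O(n + matches) instead of scanning all later pairs.
--     partner = {
--         'warfarin': ('aspirin', 'Increased bleeding risk'),
--         'nsaid': ('ace_inhibitor', 'Reduced antihypertensive effect'),
--     }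
--     positions = {b: [] for b, _ in partner.values()}
--     for j, med in enumerate(medications):
--         if med in positions:
--             positions[med].append(j)
--     interactions = []
--     for i, med in enumerate(medications):
--         hit = partner.get(med)
--         if hit is not None:
--             drug2, desc = hit
--             for j in positions[drug2]:
--                 if j > i:
--                     interactions.append({'drug1': med, 'drug2': drug2, 'interaction': desc})
--     return interactions
-- ===== Notes on version B (the rewrite author's own statement) =====
-- stated objective: faster
-- what changed: Replaced the all-pairs scan over medications[i+1:] with a one-pass position index of the two interaction partners, so each triggering drug only iterates over the recorded partner positions after it.
import Mathlib
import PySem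

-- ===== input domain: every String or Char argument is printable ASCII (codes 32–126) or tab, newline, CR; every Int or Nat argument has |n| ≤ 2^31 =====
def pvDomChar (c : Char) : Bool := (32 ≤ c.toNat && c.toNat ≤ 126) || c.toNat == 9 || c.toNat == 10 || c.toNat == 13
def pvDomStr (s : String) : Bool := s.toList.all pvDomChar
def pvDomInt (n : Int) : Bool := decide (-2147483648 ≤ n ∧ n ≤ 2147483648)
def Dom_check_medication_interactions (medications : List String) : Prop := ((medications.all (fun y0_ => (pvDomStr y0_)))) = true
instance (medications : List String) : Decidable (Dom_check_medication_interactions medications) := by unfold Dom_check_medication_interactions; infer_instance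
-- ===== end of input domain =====

-- B replaces A's O(n^2) scan of medications[i+1:] with a one-pass position
-- index of the two interaction partners (objective: faster, asymptotic).


-- ===== PORT A =====
-- known_interactions: the fixed two-entry dict
def pvKnown : PySem.Dict (String × String) String :=
  PySem.Dict.ofList [(("warfarin", "aspirin"), "Increased bleeding risk"),
                     (("nsaid", "ace_inhibitor"), "Reduced antihypertensive effect")]

def check_medication_interactions (medications : List String) : List (List (String × String)) :=
  (PySem.List.enumerate medications 0).foldl (fun interactions p =>
    let i := p.1
    let med1 := p.2
    (PySem.List.slice medications (some (i + 1)) none).foldl (fun acc med2 =>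
      match pvKnown.get? (med1, med2) with
      | some desc => acc ++ [[("drug1", med1), ("drug2", med2), ("interaction", desc)]]
      | none => acc) interactions) []

-- ===== PORT B =====
-- partner: drug -> (partner drug, description)
def pvPartner : PySem.Dict String (String × String) :=
  PySem.Dict.ofList [("warfarin", ("aspirin", "Increased bleeding risk")),
                     ("nsaid", ("ace_inhibitor", "Reduced antihypertensive effect"))]

-- positions[name]: indices j with medications[j] = name (the first loop of B, per key)
def pvPositions (name : String) (medications : List String) : List Int :=
  (PySem.List.enumerate medications 0).foldl
    (fun acc p => if p.2 = name then acc ++ [p.1] else acc) []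

def check_medication_interactions_alt (medications : List String) : List (List (String × String)) :=
  let posAsp := pvPositions "aspirin" medications
  let posAce := pvPositions "ace_inhibitor" medications
  (PySem.List.enumerate medications 0).foldl (fun out p =>
    let i := p.1
    let med := p.2
    match pvPartner.get? med with
    | some (drug2, desc) =>
        (if drug2 = "aspirin" then posAsp else posAce).foldl (fun acc j =>
          if i < j then acc ++ [[("drug1", med), ("drug2", drug2), ("interaction", desc)]]
          else acc) out
    | none => out) []

-- ===== PRECONDITION & SPEC =====
def Spec_check_medication_interactions (medications : List String) (out : List (List (String × String))) : Prop := out = check_medication_interactions_alt medications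
instance (medications : List String) (out : List (List (String × String))) : Decidable (Spec_check_medication_interactions medications out) := by unfold Spec_check_medication_interactions; infer_instance

-- ===== CLAIM (what is proved, stated in full; the proofs are below) =====
def Claim_equal_check_medication_interactions : Prop := ∀ (medications : List String), Dom_check_medication_interactions medications → Spec_check_medication_interactions medications (check_medication_interactions medications)

-- ===== LEMMAS AND PROOFS =====

-- the position-accumulating loop is a filter-map over enumerate
theorem pv_positions_eq (name : String) (meds : List String) (s : Int) :
    (PySem.List.enumerate meds s).foldl
        (fun acc p => if p.2 = name then acc ++ [p.1] else acc) []
      = ((PySem.List.enumerate meds s).filter (fun p => decide (p.2 = name))).map Prod.fst := by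
  rw [PySem.List.foldl_append_ite (p := fun q : Int × String => q.2 = name) (f := Prod.fst)]
  simp

-- key fact: number of recorded positions of `name` strictly after t equals the
-- number of occurrences of `name` in the corresponding suffix of the list
theorem pv_count_pos (name : String) (meds : List String) (t : Int) : ∀ (s : Int),
    ((((PySem.List.enumerate meds s).filter (fun p => decide (p.2 = name))).map
        Prod.fst).filter (fun j => decide (t < j))).length
      = (meds.drop (t + 1 - s).toNat).countP (fun m => decide (m = name)) := by
  induction meds with
  | nil => simp [PySem.List.enumerate]
  | cons x xs ih =>
    intro s
    rw [PySem.List.enumerate_cons]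
    by_cases hts : t < s
    · have h0 : (t + 1 - s).toNat = 0 := by omega
      have h1 : (t + 1 - (s + 1)).toNat = 0 := by omega
      have := ih (s + 1)
      rw [h1, List.drop_zero] at this
      rw [h0, List.drop_zero, List.countP_cons]
      by_cases hx : x = name <;> simp [hx, hts, this]
    · have h0 : (t + 1 - s).toNat = (t + 1 - (s + 1)).toNat + 1 := by omega
      have := ih (s + 1)
      rw [h0, List.drop_succ_cons]
      by_cases hx : x = name <;> simp [hx, hts, this]

-- the two literal dicts, reduced to their item lists
theorem pv_known_eq : pvKnown = PySem.Dict.mk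
    [(("warfarin", "aspirin"), "Increased bleeding risk"),
     (("nsaid", "ace_inhibitor"), "Reduced antihypertensive effect")] := by decide
theorem pv_partner_eq : pvPartner = PySem.Dict.mk
    [("warfarin", ("aspirin", "Increased bleeding risk")),
     ("nsaid", ("ace_inhibitor", "Reduced antihypertensive effect"))] := by decide

-- pvKnown lookups, resolved per first component
theorem pv_known_warfarin (m : String) :
    pvKnown.get? ("warfarin", m)
      = if m = "aspirin" then some "Increased bleeding risk" else none := by
  rw [pv_known_eq]
  by_cases h : m = "aspirin"
  · subst h; simp [PySem.Dict.get?]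
  · have h' : ¬ ("aspirin" = m) := fun e => h e.symm
    simp [PySem.Dict.get?, Prod.ext_iff, h', h]
theorem pv_known_nsaid (m : String) :
    pvKnown.get? ("nsaid", m)
      = if m = "ace_inhibitor" then some "Reduced antihypertensive effect" else none := by
  rw [pv_known_eq]
  by_cases h : m = "ace_inhibitor"
  · subst h; simp [PySem.Dict.get?]
  · have h' : ¬ ("ace_inhibitor" = m) := fun e => h e.symm
    simp [PySem.Dict.get?, Prod.ext_iff, h', h]
theorem pv_known_none (m1 m2 : String) (h1 : m1 ≠ "warfarin") (h2 : m1 ≠ "nsaid") :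
    pvKnown.get? (m1, m2) = none := by
  rw [pv_known_eq]
  have h1' : ¬ ("warfarin" = m1) := fun h => h1 h.symm
  have h2' : ¬ ("nsaid" = m1) := fun h => h2 h.symm
  simp [PySem.Dict.get?, Prod.ext_iff, h1', h2']

-- one outer step: A's scan of the suffix equals B's scan of the position list,
-- for an index/value pair coming from enumerate
theorem pv_step (meds : List String) (k : Nat) (hk : k < meds.length) (acc : List (List (String × String))) :
    (PySem.List.slice meds (some ((k : Int) + 1)) none).foldl (fun a med2 =>
      match pvKnown.get? (meds[k], med2) with
      | some desc => a ++ [[("drug1", meds[k]), ("drug2", med2), ("interaction", desc)]]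
      | none => a) acc
    = match pvPartner.get? meds[k] with
      | some (drug2, desc) =>
          (if drug2 = "aspirin" then pvPositions "aspirin" meds else pvPositions "ace_inhibitor" meds).foldl
            (fun a j => if (k : Int) < j then
                a ++ [[("drug1", meds[k]), ("drug2", drug2), ("interaction", desc)]] else a) acc
      | none => acc := by
  have hslice : PySem.List.slice meds (some ((k : Int) + 1)) none = meds.drop (k + 1) := by
    have : ((k : Int) + 1) = ((k + 1 : Nat) : Int) := by push_cast; ring
    rw [this, PySem.List.slice_from_natCast]
  rw [hslice]
  have hgen : ∀ (name desc : String),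
      (meds.drop (k+1)).foldl (fun a med2 =>
        if med2 = name then a ++ [[("drug1", meds[k]), ("drug2", name), ("interaction", desc)]] else a) acc
      = (pvPositions name meds).foldl (fun a j =>
          if (k : Int) < j then a ++ [[("drug1", meds[k]), ("drug2", name), ("interaction", desc)]] else a) acc := by
    intro name desc
    rw [PySem.List.foldl_append_ite (p := fun m : String => m = name)
        (f := fun _ => [("drug1", meds[k]), ("drug2", name), ("interaction", desc)])]
    rw [PySem.List.foldl_append_ite (p := fun j : Int => (k : Int) < j)
        (f := fun _ => [("drug1", meds[k]), ("drug2", name), ("interaction", desc)])]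
    congr 1
    rw [List.map_const', List.map_const']
    congr 1
    unfold pvPositions
    rw [pv_positions_eq, pv_count_pos name meds (k : Int) 0]
    have : ((k : Int) + 1 - 0).toNat = k + 1 := by omega
    rw [this, List.countP_eq_length_filter]
  by_cases h1 : meds[k] = "warfarin"
  · have hpart : pvPartner.get? meds[k] = some ("aspirin", "Increased bleeding risk") := by
      rw [h1, pv_partner_eq]; decide
    rw [hpart]
    dsimp only
    rw [show (if ("aspirin" : String) = "aspirin" then pvPositions "aspirin" meds
          else pvPositions "ace_inhibitor" meds) = pvPositions "aspirin" meds from by simp]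
    have : (fun (a : List (List (String × String))) med2 =>
        match pvKnown.get? (meds[k], med2) with
        | some desc => a ++ [[("drug1", meds[k]), ("drug2", med2), ("interaction", desc)]]
        | none => a)
      = fun a med2 => if med2 = "aspirin" then
          a ++ [[("drug1", meds[k]), ("drug2", "aspirin"), ("interaction", "Increased bleeding risk")]] else a := by
      funext a med2
      have hget : pvKnown.get? (meds[k], med2)
          = if med2 = "aspirin" then some "Increased bleeding risk" else none := by
        rw [h1]; exact pv_known_warfarin med2
      rw [hget]
      by_cases h : med2 = "aspirin" <;> simp [h]
    rw [this]
    exact hgen "aspirin" "Increased bleeding risk"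
  · by_cases h2 : meds[k] = "nsaid"
    · have hpart : pvPartner.get? meds[k] = some ("ace_inhibitor", "Reduced antihypertensive effect") := by
        rw [h2, pv_partner_eq]; decide
      rw [hpart]
      dsimp only
      rw [show (if ("ace_inhibitor" : String) = "aspirin" then pvPositions "aspirin" meds
            else pvPositions "ace_inhibitor" meds) = pvPositions "ace_inhibitor" meds from by simp]
      have : (fun (a : List (List (String × String))) med2 =>
          match pvKnown.get? (meds[k], med2) with
          | some desc => a ++ [[("drug1", meds[k]), ("drug2", med2), ("interaction", desc)]]
          | none => a)
        = fun a med2 => if med2 = "ace_inhibitor" then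
            a ++ [[("drug1", meds[k]), ("drug2", "ace_inhibitor"), ("interaction", "Reduced antihypertensive effect")]] else a := by
        funext a med2
        have hget : pvKnown.get? (meds[k], med2)
            = if med2 = "ace_inhibitor" then some "Reduced antihypertensive effect" else none := by
          rw [h2]; exact pv_known_nsaid med2
        rw [hget]
        by_cases h : med2 = "ace_inhibitor" <;> simp [h]
      rw [this]
      exact hgen "ace_inhibitor" "Reduced antihypertensive effect"
    · have hpart : pvPartner.get? meds[k] = none := by
        rw [pv_partner_eq]
        have h1' : ¬ ("warfarin" = meds[k]) := fun h => h1 h.symm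
        have h2' : ¬ ("nsaid" = meds[k]) := fun h => h2 h.symm
        simp [PySem.Dict.get?, h1', h2']
      rw [hpart]
      dsimp only
      have : (fun (a : List (List (String × String))) med2 =>
          match pvKnown.get? (meds[k], med2) with
          | some desc => a ++ [[("drug1", meds[k]), ("drug2", med2), ("interaction", desc)]]
          | none => a) = fun a _ => a := by
        funext a med2
        rw [pv_known_none meds[k] med2 h1 h2]
      rw [this, PySem.List.foldl_ignore]

-- ===== VERDICT (by name: the statement is the Claim_ definition above) =====
theorem check_medication_interactions_spec : Claim_equal_check_medication_interactions := by
  intro meds _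
  unfold Spec_check_medication_interactions check_medication_interactions check_medication_interactions_alt
  apply PySem.List.foldl_congr_mem
  intro acc p hp
  obtain ⟨k, hk, hpe⟩ := (PySem.List.mem_enumerate_iff _ _ _).mp hp
  subst hpe
  simpa using pv_step meds k hk acc
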